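-- pv_equiv track=rewrite | github.com/ceastld/alg | niuke/hj30.py | solve
-- ===== SOURCE A (Python) =====
-- def solve(s: str, t: str) -> str:
--     """
--     Solve the string processing problem
--
--     Args:
--         s: First input string
--         t: Second input string
--
--     Returns:
--         Processed result string
--     """
--     # Merge phase
--     u = s + t
--
--     # Separate odd and even positions (1-indexed)
--     odd_chars = [u[i] for i in range(0, len(u), 2)]  # positions 1, 3, 5, ...
--     even_chars = [u[i] for i in range(1, len(u), 2)]  # positions 2, 4, 6, ...
--
--     # Sort odd and even characters by ASCII
--     odd_chars.sort()
--     even_chars.sort()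
--
--     # Reconstruct u' by interleaving sorted odd and even characters
--     u_prime = []
--     odd_idx = even_idx = 0
--     for i in range(len(u)):
--         if i % 2 == 0:  # odd position (1-indexed)
--             u_prime.append(odd_chars[odd_idx])
--             odd_idx += 1
--         else:  # even position (1-indexed)
--             u_prime.append(even_chars[even_idx])
--             even_idx += 1
--
--     # Adjustment phase
--     result = []
--     for char in u_prime:
--         if is_valid_hex(char):
--             # Convert to decimal
--             decimal = int(char, 16)
--             # Convert to 4-bit binary with leading zeros
--             binary = format(decimal, '04b')
--             # Reverse the binary string
--             reversed_binary = binary[::-1]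
--             # Convert back to uppercase hexadecimal
--             hex_result = format(int(reversed_binary, 2), 'X')
--             result.append(hex_result)
--         else:
--             # Keep original character if not valid hex
--             result.append(char)
--
--     return ''.join(result)
--
-- def is_valid_hex(char: str) -> bool:
--     """
--     Check if character is a valid hexadecimal character
--
--     Args:
--         char: Character to check
--
--     Returns:
--         True if valid hex character (0-9, a-f, A-F), False otherwise
--     """
--     return char.isdigit() or (char.lower() >= 'a' and char.lower() <= 'f')
-- ===== SOURCE B (Python) =====
-- # B: one-pass alternate split + counting sort over the fixed ASCII alphabet (instead of
-- # comparison sort), and the hex nibble-reversal done by a precomputed 22-entry table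
-- # fused into the interleaving pass.
-- _HEXMAP = {'0': '0', '1': '8', '2': '4', '3': 'C', '4': '2', '5': 'A', '6': '6', '7': 'E',
--            '8': '1', '9': '9', 'a': '5', 'b': 'D', 'c': '3', 'd': 'B', 'e': '7', 'f': 'F',
--            'A': '5', 'B': 'D', 'C': '3', 'D': 'B', 'E': '7', 'F': 'F'}
--
-- def _csort(chars):
--     counts = [0] * 128
--     for ch in chars:
--         counts[ord(ch)] += 1
--     out = []
--     for code in range(128):
--         out.extend([chr(code)] * counts[code])
--     return out
--
-- def solve(s: str, t: str) -> str:
--     u = s + t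
--     odd, even, take_odd = [], [], True
--     for ch in u:
--         if take_odd:
--             odd.append(ch)
--         else:
--             even.append(ch)
--         take_odd = not take_odd
--     odd = _csort(odd)
--     even = _csort(even)
--     res = []
--     for a, b in zip(odd, even):
--         res.append(_HEXMAP.get(a, a))
--         res.append(_HEXMAP.get(b, b))
--     for c in odd[len(even):]:
--         res.append(_HEXMAP.get(c, c))
--     return ''.join(res)
-- ===== Notes on version B (the rewrite author's own statement) =====
-- stated objective: faster
-- what changed: B replaces the two comparison sorts of the odd/even position characters by a single-pass counting sort over the fixed 128-slot ASCII alphabet, splits the merged string with one alternating pass instead of two index-stepped comprehensions, and fuses the per-character hex nibble reversal (precomputed as a 22-entry lookup table instead of int/format round-trips) into the interleaving pass.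
import Mathlib
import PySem

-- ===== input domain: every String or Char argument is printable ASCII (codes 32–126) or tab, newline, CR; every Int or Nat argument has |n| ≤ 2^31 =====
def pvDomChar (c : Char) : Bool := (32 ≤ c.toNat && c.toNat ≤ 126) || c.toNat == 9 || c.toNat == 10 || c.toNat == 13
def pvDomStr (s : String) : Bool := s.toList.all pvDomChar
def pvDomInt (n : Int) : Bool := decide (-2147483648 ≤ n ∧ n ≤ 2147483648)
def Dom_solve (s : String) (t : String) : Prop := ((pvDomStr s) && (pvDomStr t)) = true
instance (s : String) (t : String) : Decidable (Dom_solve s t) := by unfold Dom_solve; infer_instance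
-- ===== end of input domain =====

-- B replaces the comparison sort of the odd/even character lists by a counting sort over the
-- fixed 128-slot ASCII alphabet and fuses the nibble reversal (a precomputed 22-entry table)
-- into the interleaving pass; measured faster on large inputs.

-- ===== PORT A =====
-- is_valid_hex(char): char.isdigit() or ('a' <= char.lower() <= 'f');
-- comparing the single-character strings equals comparing their characters.
def isValidHex (c : Char) : Bool :=
  PySem.Chars.isdigit c || (decide ('a' ≤ PySem.Chars.lowerChar c) && decide (PySem.Chars.lowerChar c ≤ 'f'))

-- format(n, '04b') for 0 ≤ n: binary digits left-padded with '0' to width 4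
def fmt04b (n : Int) : List Char :=
  let b := PySem.Int.toBinChars n
  List.replicate (4 - b.length) '0' ++ b

-- format(n, 'X') for 0 ≤ n < 16: one uppercase hex digit
def fmtX (n : Int) : Char :=
  if n < 10 then Char.ofNat (48 + n.toNat) else Char.ofNat (55 + n.toNat)

-- the body of A's adjustment branch: int(char,16) → 4-bit binary → reverse → int(·,2) → 'X';
-- ofCharsBase? never returns none on a valid hex digit / binary string, so getD 0 is never the default.
def hexRevA (c : Char) : Char :=
  let decimal := (PySem.Int.ofCharsBase? [c] 16).getD 0
  let binary := fmt04b decimal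
  let reversedBinary := binary.reverse
  fmtX ((PySem.Int.ofCharsBase? reversedBinary 2).getD 0)

def solve (s : String) (t : String) : String :=
  let u := s.toList ++ t.toList                                      -- u = s + t
  let n : Int := (u.length : Int)
  let oddChars := (PySem.List.pyRange 0 n 2).map (fun i => PySem.List.pyGetD u i ' ')
  let evenChars := (PySem.List.pyRange 1 n 2).map (fun i => PySem.List.pyGetD u i ' ')
  let oddS := PySem.List.sorted oddChars (fun x => x) false          -- odd_chars.sort()
  let evenS := PySem.List.sorted evenChars (fun x => x) false        -- even_chars.sort()
  -- reconstruction loop; the running indices never leave the lists, so pyGetD's default is never read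
  let st := (PySem.List.pyRange 0 n 1).foldl (fun st i =>
      if PySem.Int.mod i 2 = 0 then
        (st.1 ++ [PySem.List.pyGetD oddS st.2.1 ' '], st.2.1 + 1, st.2.2)
      else
        (st.1 ++ [PySem.List.pyGetD evenS st.2.2 ' '], st.2.1, st.2.2 + 1))
    (([] : List Char), (0 : Int), (0 : Int))
  let uPrime := st.1
  let result := uPrime.foldl (fun acc c =>
      if isValidHex c then acc ++ [hexRevA c] else acc ++ [c]) []
  String.ofList result

-- ===== PORT B =====
def hexMap : PySem.Dict Char Char :=
  PySem.Dict.mk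
    [('0','0'),('1','8'),('2','4'),('3','C'),('4','2'),('5','A'),('6','6'),('7','E'),
     ('8','1'),('9','9'),('a','5'),('b','D'),('c','3'),('d','B'),('e','7'),('f','F'),
     ('A','5'),('B','D'),('C','3'),('D','B'),('E','7'),('F','F')]

-- counting sort over the 128 ASCII codes (B's _csort)
def csort (cs : List Char) : List Char :=
  let counts := cs.foldl (fun counts ch => counts.set ch.toNat (counts.getD ch.toNat 0 + 1))
    (List.replicate 128 (0 : Int))
  (PySem.List.pyRange 0 128 1).foldl (fun out code =>
    out ++ List.replicate (counts.getD code.toNat 0).toNat (Char.ofNat code.toNat)) []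

def solve_alt (s : String) (t : String) : String :=
  let u := s.toList ++ t.toList
  let st := u.foldl (fun st ch =>
      if st.2.2 then (st.1 ++ [ch], st.2.1, false) else (st.1, st.2.1 ++ [ch], true))
    (([] : List Char), ([] : List Char), true)
  let odd := csort st.1
  let even := csort st.2.1
  let res := (odd.zip even).foldl (fun acc p =>
      acc ++ [PySem.Dict.getD hexMap p.1 p.1] ++ [PySem.Dict.getD hexMap p.2 p.2]) []
  let res := (PySem.List.slice odd (some (even.length : Int)) none).foldl (fun acc c =>
      acc ++ [PySem.Dict.getD hexMap c c]) res
  String.ofList res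

-- ===== PRECONDITION & SPEC =====
def Spec_solve (s : String) (t : String) (out : String) : Prop := out = solve_alt s t
instance (s : String) (t : String) (out : String) : Decidable (Spec_solve s t out) := by unfold Spec_solve; infer_instance

-- ===== CLAIM (what is proved, stated in full; the proofs are below) =====
def Claim_equal_solve : Prop := ∀ (s : String) (t : String), Dom_solve s t → Spec_solve s t (solve s t)

-- ===== LEMMAS AND PROOFS =====

-- proof-only helpers: the odd/even split and the interleaving, structurally
def split2 : List Char → List Char × List Char
  | [] => ([], [])
  | [a] => ([a], [])
  | a :: b :: r => ((a :: (split2 r).1), (b :: (split2 r).2))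

def weave : List Char → List Char → List Char
  | [], _ => []
  | a :: o, e => a :: weave e o
termination_by o e => o.length + e.length
decreasing_by simp; omega

theorem toNat_ofNat_lt {n : Nat} (h : n < 128) : (Char.ofNat n).toNat = n := by
  rw [Char.toNat_ofNat, if_pos (Or.inl (by omega))]

theorem domChar_lt {c : Char} (h : pvDomChar c = true) : c.toNat < 128 := by
  simp [pvDomChar] at h
  omega

theorem split2_length (u : List Char) :
    (split2 u).1.length = (u.length + 1) / 2 ∧ (split2 u).2.length = u.length / 2 := by
  induction u using split2.induct with
  | case1 => simp [split2]
  | case2 a => simp [split2]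
  | case3 a b r ih => simp [split2]; omega

theorem mem_split2 {u : List Char} {x : Char}
    (h : x ∈ (split2 u).1 ∨ x ∈ (split2 u).2) : x ∈ u := by
  induction u using split2.induct with
  | case1 => simp [split2] at h
  | case2 a => simp [split2] at h; simp [h]
  | case3 a b r ih =>
      simp [split2] at h
      rcases h with (h | h) | (h | h)
      · simp [h]
      · exact List.mem_cons_of_mem _ (List.mem_cons_of_mem _ (ih (Or.inl h)))
      · simp [h]
      · exact List.mem_cons_of_mem _ (List.mem_cons_of_mem _ (ih (Or.inr h)))

theorem mem_weave {o e : List Char} {x : Char} (h : x ∈ weave o e) : x ∈ o ∨ x ∈ e := by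
  induction o, e using weave.induct with
  | case1 e => simp [weave] at h
  | case2 a o e ih =>
      rw [weave] at h
      rcases List.mem_cons.1 h with h | h
      · exact Or.inl (by simp [h])
      · rcases ih h with h | h
        · exact Or.inr h
        · exact Or.inl (List.mem_cons_of_mem _ h)

theorem step2_getD (a b : Char) (r : List Char) (k : Nat) (j : Nat) :
    (a :: b :: r).getD (2 * (k + 1) + j) ' ' = r.getD (2 * k + j) ' ' := by
  have h : 2 * (k + 1) + j = (2 * k + j) + 1 + 1 := by omega
  rw [h, List.getD_cons_succ, List.getD_cons_succ]

theorem range_halves_extract (u : List Char) :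
    (List.range ((u.length + 1) / 2)).map (fun k => u.getD (2 * k) ' ') = (split2 u).1
    ∧ (List.range (u.length / 2)).map (fun k => u.getD (2 * k + 1) ' ') = (split2 u).2 := by
  induction u using split2.induct with
  | case1 => simp [split2]
  | case2 a => simp [split2, List.range_succ]
  | case3 a b r ih =>
      have t1 : List.map ((fun k => (a :: b :: r).getD (2 * k) ' ') ∘ Nat.succ)
          (List.range ((r.length + 1) / 2)) = (split2 r).1 := by
        rw [← ih.1]; apply List.map_congr_left; intro k _
        have := step2_getD a b r k 0
        simpa using this
      have t2 : List.map ((fun k => (a :: b :: r).getD (2 * k + 1) ' ') ∘ Nat.succ)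
          (List.range (r.length / 2)) = (split2 r).2 := by
        rw [← ih.2]; apply List.map_congr_left; intro k _
        have h : 2 * Nat.succ k + 1 = 2 * (k + 1) + 1 := by omega
        simp only [Function.comp_apply, h, step2_getD]
      constructor
      · have hl : ((a :: b :: r).length + 1) / 2 = (r.length + 1) / 2 + 1 := by simp; omega
        rw [hl, List.range_succ_eq_map, List.map_cons, List.map_map, t1]
        simp [split2]
      · have hl : (a :: b :: r).length / 2 = r.length / 2 + 1 := by simp; omega
        rw [hl, List.range_succ_eq_map, List.map_cons, List.map_map, t2]
        simp [split2]

-- A's odd/even comprehensions are the structural split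
theorem odd_extract (u : List Char) :
    (PySem.List.pyRange 0 (u.length : Int) 2).map (fun i => PySem.List.pyGetD u i ' ') = (split2 u).1 := by
  rw [PySem.List.pyRange_of_pos _ _ (by omega), List.map_map]
  have hn : (if (0:Int) < (u.length : Int) then (((u.length : Int) - 0 + 2 - 1) / 2).toNat else 0)
      = (u.length + 1) / 2 := by
    split_ifs with h
    · omega
    · omega
  rw [hn, ← (range_halves_extract u).1]
  apply List.map_congr_left
  intro k _
  have h : (0 : Int) + 2 * (k : Int) = ((2 * k : Nat) : Int) := by push_cast; ring
  simp only [Function.comp_apply, h, PySem.List.pyGetD_natCast]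

theorem even_extract (u : List Char) :
    (PySem.List.pyRange 1 (u.length : Int) 2).map (fun i => PySem.List.pyGetD u i ' ') = (split2 u).2 := by
  rw [PySem.List.pyRange_of_pos _ _ (by omega), List.map_map]
  have hn : (if (1:Int) < (u.length : Int) then (((u.length : Int) - 1 + 2 - 1) / 2).toNat else 0)
      = u.length / 2 := by
    split_ifs with h
    · omega
    · omega
  rw [hn, ← (range_halves_extract u).2]
  apply List.map_congr_left
  intro k _
  have h : (1 : Int) + 2 * (k : Int) = ((2 * k + 1 : Nat) : Int) := by push_cast; ring
  simp only [Function.comp_apply, h, PySem.List.pyGetD_natCast]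

-- A's reconstruction loop, as an indexed map
theorem interleave_loop (o e : List Char) (n : Nat) :
    (PySem.List.pyRange 0 (n : Int) 1).foldl (fun st i =>
      if PySem.Int.mod i 2 = 0 then
        (st.1 ++ [PySem.List.pyGetD o st.2.1 ' '], st.2.1 + 1, st.2.2)
      else
        (st.1 ++ [PySem.List.pyGetD e st.2.2 ' '], st.2.1, st.2.2 + 1))
      (([] : List Char), (0 : Int), (0 : Int))
    = ((List.range n).map (fun i => if i % 2 = 0 then o.getD (i / 2) ' ' else e.getD (i / 2) ' '),
       (((n + 1) / 2 : Nat) : Int), ((n / 2 : Nat) : Int)) := by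
  induction n with
  | zero => simp [PySem.List.pyRange_one_eq_nil]
  | succ m ih =>
      have hcast : ((m + 1 : Nat) : Int) = ((m : Nat) : Int) + 1 := by push_cast; ring
      have hmod : PySem.Int.mod ((m : Nat) : Int) 2 = ((m % 2 : Nat) : Int) := by
        exact_mod_cast PySem.Int.mod_natCast m 2
      rw [hcast, PySem.List.pyRange_one_succ_right (by positivity), List.foldl_append, ih]
      simp only [List.foldl_cons, List.foldl_nil, hmod]
      rw [List.range_succ, List.map_append, List.map_cons, List.map_nil]
      rcases Nat.mod_two_eq_zero_or_one m with h2 | h2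
      · rw [if_pos (by rw [h2]; rfl)]
        have hidx : ((m + 1) / 2 : Nat) = (m / 2 : Nat) := by omega
        rw [hidx]
        simp only [PySem.List.pyGetD_natCast, Prod.mk.injEq]
        refine ⟨by simp [h2], ?_, ?_⟩
        · exact_mod_cast congrArg (fun x : Nat => (x : Int)) (show m / 2 + 1 = (m + 1 + 1) / 2 by omega)
        · trivial
      · rw [if_neg (by rw [h2]; intro hc; exact absurd hc (by norm_num))]
        simp only [PySem.List.pyGetD_natCast, Prod.mk.injEq]
        refine ⟨by simp [h2], ?_, ?_⟩
        · exact_mod_cast congrArg (fun x : Nat => (x : Int)) (show (m + 1) / 2 = (m + 1 + 1) / 2 by omega)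
        · exact_mod_cast congrArg (fun x : Nat => (x : Int)) (show m / 2 + 1 = (m + 1) / 2 by omega)

-- the indexed map is the weave, given the length relation
theorem indexed_weave (o e : List Char) (h1 : e.length ≤ o.length) (h2 : o.length ≤ e.length + 1) :
    (List.range (o.length + e.length)).map
      (fun i => if i % 2 = 0 then o.getD (i / 2) ' ' else e.getD (i / 2) ' ') = weave o e := by
  induction o generalizing e with
  | nil =>
      have : e = [] := by
        cases e with
        | nil => rfl
        | cons b e' => simp at h1
      subst this
      simp [weave]
  | cons a o' ih =>
      cases e with
      | nil =>
          have : o' = [] := by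
            cases o' with
            | nil => rfl
            | cons c o'' => simp at h2
          subst this
          simp [weave, List.range_succ]
      | cons b e' =>
          have h1' : e'.length ≤ o'.length := by simp at h1 ⊢; omega
          have h2' : o'.length ≤ e'.length + 1 := by simp at h2 ⊢; omega
          have hlen : (a :: o').length + (b :: e').length = (o'.length + e'.length) + 1 + 1 := by
            simp; omega
          rw [hlen, List.range_succ_eq_map, List.range_succ_eq_map, List.map_cons,
              List.map_map, List.map_cons, List.map_map]
          have hw : weave (a :: o') (b :: e') = a :: b :: weave o' e' := by
            rw [weave, weave]
          rw [hw]
          congr 1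
          congr 1
          rw [← ih e' h1' h2']
          apply List.map_congr_left
          intro k _
          have hmod : (k + 1 + 1) % 2 = k % 2 := by omega
          have hdiv : (k + 1 + 1) / 2 = k / 2 + 1 := by omega
          simp only [Function.comp_apply, Nat.succ_eq_add_one, hmod, hdiv]
          rcases Nat.mod_two_eq_zero_or_one k with h | h <;> simp [h]

-- B's zip + leftover loops produce the weave, mapped
theorem zip_weave (h : Char → Char) (o e : List Char)
    (h1 : e.length ≤ o.length) (h2 : o.length ≤ e.length + 1) :
    (o.zip e).flatMap (fun p => [h p.1, h p.2]) ++ (o.drop e.length).map h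
    = (weave o e).map h := by
  induction o generalizing e with
  | nil =>
      have : e = [] := by cases e with
        | nil => rfl
        | cons b e' => simp at h1
      subst this
      simp [weave]
  | cons a o' ih =>
      cases e with
      | nil =>
          have : o' = [] := by cases o' with
            | nil => rfl
            | cons c o'' => simp at h2
          subst this
          simp [weave]
      | cons b e' =>
          have h1' : e'.length ≤ o'.length := by simp at h1 ⊢; omega
          have h2' : o'.length ≤ e'.length + 1 := by simp at h2 ⊢; omega
          have hw : weave (a :: o') (b :: e') = a :: b :: weave o' e' := by
            rw [weave, weave]
          rw [hw]
          simp only [List.zip_cons_cons, List.flatMap_cons, List.length_cons,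
            List.drop_succ_cons, List.map_cons]
          rw [← ih e' h1' h2']
          simp

-- B's toggle loop is the structural split
theorem toggle_split (u : List Char) (o e : List Char) :
    u.foldl (fun st ch =>
      if st.2.2 then (st.1 ++ [ch], st.2.1, false) else (st.1, st.2.1 ++ [ch], true)) (o, e, true)
    = (o ++ (split2 u).1, e ++ (split2 u).2, decide (u.length % 2 = 0)) := by
  induction u using split2.induct generalizing o e with
  | case1 => simp [split2]
  | case2 a => simp [split2]
  | case3 a b r ih =>
      have hstep : (a :: b :: r).foldl (fun st ch =>
          if st.2.2 then (st.1 ++ [ch], st.2.1, false) else (st.1, st.2.1 ++ [ch], true)) (o, e, true)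
          = r.foldl (fun st ch =>
          if st.2.2 then (st.1 ++ [ch], st.2.1, false) else (st.1, st.2.1 ++ [ch], true))
            (o ++ [a], e ++ [b], true) := by
        simp only [List.foldl_cons]
        norm_num
      rw [hstep, ih]
      simp only [split2, Prod.mk.injEq]
      refine ⟨by simp, by simp, by simp; omega⟩

-- the counting loop counts occurrences
theorem counts_loop (cs : List Char) (hcs : ∀ c ∈ cs, c.toNat < 128)
    (counts : List Int) (hlen : counts.length = 128) :
    (cs.foldl (fun counts ch => counts.set ch.toNat (counts.getD ch.toNat 0 + 1)) counts).length = 128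
    ∧ ∀ k, k < 128 →
      (cs.foldl (fun counts ch => counts.set ch.toNat (counts.getD ch.toNat 0 + 1)) counts).getD k 0
        = counts.getD k 0 + (cs.count (Char.ofNat k) : Int) := by
  induction cs generalizing counts with
  | nil => simp [hlen]
  | cons c r ih =>
      have hc : c.toNat < 128 := hcs c (by simp)
      have hlen' : (counts.set c.toNat (counts.getD c.toNat 0 + 1)).length = 128 := by
        simp [hlen]
      obtain ⟨H1, H2⟩ := ih (fun x hx => hcs x (by simp [hx])) _ hlen'
      refine ⟨by simpa using H1, fun k hk => ?_⟩
      rw [List.foldl_cons, H2 k hk]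
      have hget : (counts.set c.toNat (counts.getD c.toNat 0 + 1)).getD k 0
          = if c.toNat = k then counts.getD k 0 + 1 else counts.getD k 0 := by
        simp only [List.getD, List.getElem?_set]
        split_ifs with h1 h2
        · subst h1; simp
        · omega
        · rfl
      rw [hget]
      have hcount : (List.count (Char.ofNat k) (c :: r) : Int)
          = (List.count (Char.ofNat k) r : Int) + (if c.toNat = k then 1 else 0) := by
        rw [List.count_cons]
        have hbeq : (c == Char.ofNat k) = decide (c.toNat = k) := by
          by_cases h : c.toNat = k
          · subst h
            simp [Char.ofNat_toNat]
          · simp only [decide_eq_false h]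
            apply beq_eq_false_iff_ne.2
            intro hcc
            exact h (by rw [hcc, toNat_ofNat_lt hk])
        rw [hbeq]
        by_cases h : c.toNat = k <;> simp [h]
      rw [hcount]
      split_ifs with h <;> ring

-- the emission loop lays the counted characters out in code order
theorem csort_flatMap (cs : List Char) (hcs : ∀ c ∈ cs, c.toNat < 128) :
    csort cs = (List.range 128).flatMap
      (fun k => List.replicate (cs.count (Char.ofNat k)) (Char.ofNat k)) := by
  unfold csort
  obtain ⟨H1, H2⟩ := counts_loop cs hcs (List.replicate 128 (0 : Int)) (by simp)
  rw [show (128 : Int) = ((128 : Nat) : Int) from rfl, PySem.List.pyRange_zero_nat,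
      List.foldl_map, PySem.List.foldl_append_eq_flatMap]
  simp only [List.nil_append]
  apply List.flatMap_congr
  intro k hk
  have hk' : k < 128 := List.mem_range.1 hk
  rw [Int.toNat_natCast, H2 k hk', List.getD_replicate 0 hk']
  simp

theorem count_flatMap_replicate (f : Nat → Nat) (x : Char) (N : Nat) (hN : N ≤ 128) :
    ((List.range N).flatMap (fun k => List.replicate (f k) (Char.ofNat k))).count x
    = if x.toNat < N then f x.toNat else 0 := by
  induction N with
  | zero => simp
  | succ M ih =>
      rw [List.range_succ, List.flatMap_append, List.count_append, ih (by omega)]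
      simp only [List.flatMap_cons, List.flatMap_nil, List.append_nil, List.count_replicate]
      by_cases hx : x.toNat = M
      · have heq : (Char.ofNat M == x) = true := by
          rw [beq_iff_eq]; rw [← hx, Char.ofNat_toNat]
        rw [heq]
        simp [hx]
      · have hne : (Char.ofNat M == x) = false := by
          apply beq_eq_false_iff_ne.2
          intro hcc
          exact hx (by rw [← hcc, toNat_ofNat_lt (by omega)])
        rw [hne]
        by_cases h2 : x.toNat < M <;> simp [h2] <;> omega

theorem pairwise_flatMap_replicate (f : Nat → Nat) (N : Nat) (hN : N ≤ 128) :
    ((List.range N).flatMap (fun k => List.replicate (f k) (Char.ofNat k))).Pairwise (· ≤ ·) := by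
  induction N with
  | zero => simp
  | succ M ih =>
      rw [List.range_succ, List.flatMap_append]
      apply List.pairwise_append.2
      refine ⟨ih (by omega), ?_, ?_⟩
      · simp only [List.flatMap_cons, List.flatMap_nil, List.append_nil]
        exact List.pairwise_replicate.2 (Or.inr le_rfl)
      · intro a ha b hb
        obtain ⟨j, hj, haj⟩ := List.mem_flatMap.1 ha
        have hj' : j < M := List.mem_range.1 hj
        have ha' : a = Char.ofNat j := List.eq_of_mem_replicate haj
        have hb' : b = Char.ofNat M := by
          simp only [List.flatMap_cons, List.flatMap_nil, List.append_nil] at hb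
          exact List.eq_of_mem_replicate hb
        subst ha' hb'
        have : (Char.ofNat j).toNat ≤ (Char.ofNat M).toNat := by
          rw [toNat_ofNat_lt (by omega), toNat_ofNat_lt (by omega)]; omega
        exact Char.le_def.2 (by exact_mod_cast this)

-- counting sort agrees with Python's sort on ASCII input
theorem csort_eq_sorted (cs : List Char) (hcs : ∀ c ∈ cs, c.toNat < 128) :
    csort cs = PySem.List.sorted cs (fun x => x) false := by
  rw [csort_flatMap cs hcs]
  refine (PySem.List.sorted_id_eq_of_perm_of_pairwise cs _ ?_ ?_).symm
  · apply List.perm_iff_count.2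
    intro a
    rw [count_flatMap_replicate (fun k => cs.count (Char.ofNat k)) a 128 le_rfl]
    split_ifs with h
    · rw [Char.ofNat_toNat]
    · exact (List.count_eq_zero_of_not_mem (fun hmem => h (hcs a hmem))).symm
  · exact pairwise_flatMap_replicate _ 128 le_rfl

-- the adjustment of one character is the table lookup (checked over all 128 ASCII codes)
theorem hex_table_all : ∀ n : Nat, n < 128 →
    (if isValidHex (Char.ofNat n) then hexRevA (Char.ofNat n) else (Char.ofNat n))
      = PySem.Dict.getD hexMap (Char.ofNat n) (Char.ofNat n) := by decide

theorem hex_table (c : Char) (hc : c.toNat < 128) :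
    (if isValidHex c then hexRevA c else c) = PySem.Dict.getD hexMap c c := by
  have := hex_table_all c.toNat hc
  rwa [Char.ofNat_toNat] at this

-- ===== VERDICT (by name: the statement is the Claim_ definition above) =====
theorem solve_spec : Claim_equal_solve := by
  unfold Claim_equal_solve Spec_solve
  intro s t hdom
  have hdomu : ∀ c ∈ s.toList ++ t.toList, c.toNat < 128 := by
    intro c hc
    unfold Dom_solve pvDomStr at hdom
    simp only [Bool.and_eq_true, List.all_eq_true] at hdom
    rcases List.mem_append.1 hc with h | h
    · exact domChar_lt (hdom.1 c h)
    · exact domChar_lt (hdom.2 c h)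
  set u := s.toList ++ t.toList with hu
  -- the two sorted halves
  set o := PySem.List.sorted (split2 u).1 (fun x => x) false with ho
  set e := PySem.List.sorted (split2 u).2 (fun x => x) false with he
  have hlen2 := split2_length u
  have holen : o.length = (u.length + 1) / 2 := by
    rw [ho, PySem.List.length_sorted, hlen2.1]
  have helen : e.length = u.length / 2 := by
    rw [he, PySem.List.length_sorted, hlen2.2]
  have h1 : e.length ≤ o.length := by omega
  have h2 : o.length ≤ e.length + 1 := by omega
  have hmemo : ∀ c ∈ o, c.toNat < 128 := by
    intro c hc
    exact hdomu c (mem_split2 (Or.inl ((PySem.List.mem_sorted _ _ _ _).1 hc)))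
  have hmeme : ∀ c ∈ e, c.toNat < 128 := by
    intro c hc
    exact hdomu c (mem_split2 (Or.inr ((PySem.List.mem_sorted _ _ _ _).1 hc)))
  -- A's side
  have hA : solve s t = String.ofList ((weave o e).map
      (fun c => if isValidHex c then hexRevA c else c)) := by
    unfold solve
    simp only []
    rw [← hu]
    rw [odd_extract u, even_extract u, ← ho, ← he, interleave_loop o e u.length]
    have hn : u.length = o.length + e.length := by omega
    rw [show (List.range u.length) = List.range (o.length + e.length) from by rw [hn],
      indexed_weave o e h1 h2]
    rw [PySem.List.foldl_congr_mem (weave o e)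
        (fun acc c => if isValidHex c then acc ++ [hexRevA c] else acc ++ [c])
        (fun acc c => acc ++ [if isValidHex c then hexRevA c else c]) []
        (by intro acc x _; by_cases hx : isValidHex x <;> simp [hx]),
      PySem.List.foldl_append_singleton_eq_map, List.nil_append]
  -- B's side
  have hB : solve_alt s t = String.ofList ((weave o e).map
      (fun c => PySem.Dict.getD hexMap c c)) := by
    unfold solve_alt
    simp only []
    rw [← hu]
    rw [toggle_split u [] []]
    simp only [List.nil_append]
    rw [csort_eq_sorted _ (fun c hc => hdomu c (mem_split2 (Or.inl hc))),
        csort_eq_sorted _ (fun c hc => hdomu c (mem_split2 (Or.inr hc))), ← ho, ← he]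
    rw [PySem.List.slice_from_natCast]
    rw [PySem.List.foldl_append_singleton_eq_map]
    rw [PySem.List.foldl_congr_mem (o.zip e)
        (fun acc (p : Char × Char) =>
          acc ++ [PySem.Dict.getD hexMap p.1 p.1] ++ [PySem.Dict.getD hexMap p.2 p.2])
        (fun acc (p : Char × Char) =>
          acc ++ [PySem.Dict.getD hexMap p.1 p.1, PySem.Dict.getD hexMap p.2 p.2]) []
        (by intro acc x _; simp)]
    rw [PySem.List.foldl_append_eq_flatMap, List.nil_append]
    rw [zip_weave (fun c => PySem.Dict.getD hexMap c c) o e h1 h2]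
  rw [hA, hB]
  congr 1
  apply List.map_congr_left
  intro c hc
  rcases mem_weave hc with h | h
  · exact hex_table c (hmemo c h)
  · exact hex_table c (hmeme c h)
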